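-- pv_equiv track=rewrite | github.com/Kingcitaldo125/PythonSourceFiles | same_vowel_group/same_vowel_group.py | same_vowel_group
-- ===== SOURCE A (Python) =====
-- def same_vowel_group(mlist):
-- 	mvowels = set(['a', 'e', 'i', 'o', 'u'])
-- 	mset = set([i for i in mlist[0] if i in mvowels])
-- 	retlist = []
--
-- 	for idx in range(1,len(mlist)):
-- 		itm = mlist[idx]
-- 		vowel_count = 0
--
-- 		for i in set([i for i in itm]):
-- 			if i in mvowels:
-- 				if i in mset:
-- 					vowel_count += 1
-- 				else:
-- 					vowel_count -= 1
--
-- 		if vowel_count == len(mset):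
-- 			retlist.append(itm)
--
-- 	return [mlist[0]] + retlist
-- ===== SOURCE B (Python) =====
-- def same_vowel_group(mlist):
--     vowels = {'a', 'e', 'i', 'o', 'u'}
--     first = {c for c in mlist[0] if c in vowels}
--     return [mlist[0]] + [w for w in mlist[1:]
--                          if {c for c in w if c in vowels} == first]
-- ===== Notes on version B (the rewrite author's own statement) =====
-- stated objective: simpler
-- what changed: B replaces A's per-word signed +1/-1 deviation count over the word's distinct characters (accepted when the total equals len(mset)) by building each word's vowel set and testing set equality with the first word's vowel set.
import Mathlib
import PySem

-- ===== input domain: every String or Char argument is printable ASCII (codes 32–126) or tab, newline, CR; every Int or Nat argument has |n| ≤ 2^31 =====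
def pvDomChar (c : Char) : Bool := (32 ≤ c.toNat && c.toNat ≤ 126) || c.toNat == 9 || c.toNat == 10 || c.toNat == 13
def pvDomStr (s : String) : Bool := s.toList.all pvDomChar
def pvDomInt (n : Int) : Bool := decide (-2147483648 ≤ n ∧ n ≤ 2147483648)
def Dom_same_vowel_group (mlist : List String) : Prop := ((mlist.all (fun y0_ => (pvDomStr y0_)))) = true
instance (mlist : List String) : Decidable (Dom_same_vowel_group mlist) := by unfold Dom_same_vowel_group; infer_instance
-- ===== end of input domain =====

-- B replaces A's ±1 deviation counting over each word's distinct characters by a direct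
-- set-equality test between each word's vowel set and the first word's vowel set (simpler).

-- ===== PORT A =====
def svgVowels : List Char := ['a', 'e', 'i', 'o', 'u']

def same_vowel_group (mlist : List String) : List String :=
  match mlist with
  | [] => []  -- Python raises IndexError on mlist[0]; excluded by Pre_
  | first :: rest =>
    let mset : PySem.Set Char :=
      PySem.Set.ofList (first.toList.filter (fun i => svgVowels.contains i))
    let retlist : List String := rest.foldl (fun retlist itm =>
      let vc : Int := (PySem.Set.ofList itm.toList).foldl (fun vc i =>
          if svgVowels.contains i then
            (if mset.contains i then vc + 1 else vc - 1)
          else vc) 0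
      if vc = PySem.Set.len mset then retlist ++ [itm] else retlist) []
    [first] ++ retlist

-- ===== PORT B =====
def svgVowelSet (w : String) : PySem.Set Char :=
  PySem.Set.ofList (w.toList.filter (fun c => svgVowels.contains c))

def same_vowel_group_alt (mlist : List String) : List String :=
  match mlist with
  | [] => []  -- Python raises IndexError on mlist[0]; excluded by Pre_
  | first :: rest =>
    [first] ++ rest.filter (fun w => PySem.Set.equal (svgVowelSet w) (svgVowelSet first))

-- ===== PRECONDITION & SPEC =====
-- Pre_ excludes only the empty list, on which Python's mlist[0] raises IndexError.
def Pre_same_vowel_group (mlist : List String) : Prop := mlist ≠ []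
instance (mlist : List String) : Decidable (Pre_same_vowel_group mlist) := by
  unfold Pre_same_vowel_group; infer_instance

def pvWitness_same_vowel_group : List String := ["tree", "bee", "cat"]

def Spec_same_vowel_group (mlist : List String) (out : List String) : Prop := out = same_vowel_group_alt mlist
instance (mlist : List String) (out : List String) : Decidable (Spec_same_vowel_group mlist out) := by unfold Spec_same_vowel_group; infer_instance

-- ===== CLAIM (what is proved, stated in full; the proofs are below) =====
def Claim_equal_same_vowel_group : Prop := ∀ (mlist : List String), Dom_same_vowel_group mlist → Pre_same_vowel_group mlist → Spec_same_vowel_group mlist (same_vowel_group mlist)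

-- ===== LEMMAS AND PROOFS =====

-- A's inner fold computes (#distinct chars that are vowels in mset) − (#distinct vowels not in mset).
lemma svg_fold_counts (mset : PySem.Set Char) (l : List Char) (z : Int) :
    l.foldl (fun vc i =>
        if svgVowels.contains i then
          (if PySem.Set.contains mset i then vc + 1 else vc - 1)
        else vc) z
      = z + (l.countP (fun i => svgVowels.contains i && mset.contains i) : Int)
          - (l.countP (fun i => svgVowels.contains i && !mset.contains i) : Int) := by
  induction l generalizing z with
  | nil => simp
  | cons x xs ih =>
    simp only [List.foldl_cons, List.countP_cons, ih]
    by_cases hv : x ∈ svgVowels <;> by_cases hm : x ∈ mset <;>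
      simp [hv, hm] <;> omega

-- A's acceptance condition is exactly vowel-set equality.
lemma svg_cond_iff (first itm : String) :
    (letI mset := PySem.Set.ofList (first.toList.filter (fun i => svgVowels.contains i))
     (PySem.Set.ofList itm.toList).foldl (fun vc i =>
        if svgVowels.contains i then
          (if mset.contains i then vc + 1 else vc - 1)
        else vc) 0 = PySem.Set.len mset)
    ↔ PySem.Set.equal (svgVowelSet itm) (svgVowelSet first) = true := by
  set mset := PySem.Set.ofList (first.toList.filter (fun i => svgVowels.contains i)) with hmset
  set S := PySem.Set.ofList itm.toList with hS
  have hmsnd : mset.Nodup := PySem.Set.nodup_ofList _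
  have hSnd : S.Nodup := PySem.Set.nodup_ofList _
  have hmv : ∀ c ∈ mset, c ∈ svgVowels := by
    intro c hc
    rw [hmset] at hc
    have := (PySem.Set.mem_ofList _ _).1 hc
    simpa using (List.mem_filter.1 this).2
  rw [svg_fold_counts mset S 0, PySem.Set.equal_iff]
  have hlen : PySem.Set.len mset = (mset.length : Int) := by
    simp [PySem.Set.len]
  rw [hlen, List.countP_eq_length_filter, List.countP_eq_length_filter]
  set p : Char → Bool := fun i => svgVowels.contains i && PySem.Set.contains mset i with hp
  set q : Char → Bool := fun i => svgVowels.contains i && !PySem.Set.contains mset i with hq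
  have hmemS : ∀ c, c ∈ S ↔ c ∈ itm.toList := fun c => PySem.Set.mem_ofList _ _
  have hpfact : ∀ c, p c = true ↔ (c ∈ svgVowels ∧ c ∈ mset) := by
    intro c
    simp [hp]
  have hqfact : ∀ c, q c = true ↔ (c ∈ svgVowels ∧ c ∉ mset) := by
    intro c
    simp [hq]
  have hfin : (S.filter p).toFinset ⊆ mset.toFinset := by
    intro c hc
    rw [List.mem_toFinset] at hc ⊢
    exact ((hpfact c).1 (List.mem_filter.1 hc).2).2
  have hPle : (S.filter p).length ≤ mset.length := by
    rw [← List.toFinset_card_of_nodup (hSnd.filter p),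
        ← List.toFinset_card_of_nodup hmsnd]
    exact Finset.card_le_card hfin
  have hchar : ∀ x, x ∈ svgVowelSet itm ↔ (x ∈ itm.toList ∧ x ∈ svgVowels) := by
    intro x
    simp [svgVowelSet, PySem.Set.mem_ofList, List.mem_filter]
  have hfirst : ∀ x, x ∈ svgVowelSet first ↔ x ∈ mset := fun _ => Iff.rfl
  have hgoal2 : (∀ x, x ∈ svgVowelSet itm ↔ x ∈ svgVowelSet first)
      ↔ (∀ x, (x ∈ itm.toList ∧ x ∈ svgVowels) ↔ x ∈ mset) := by
    constructor <;> intro hh x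
    · exact (hchar x).symm.trans ((hh x).trans (hfirst x))
    · exact (hchar x).trans ((hh x).trans (hfirst x).symm)
  rw [hgoal2]
  constructor
  · intro h
    have hP : (S.filter p).length = mset.length := by omega
    have hQ : (S.filter q).length = 0 := by omega
    have hQ' : ∀ c ∈ S, q c = false := by
      intro c hc
      by_contra hcq
      have : c ∈ S.filter q := List.mem_filter.2 ⟨hc, by simpa using hcq⟩
      simp [List.length_eq_zero_iff.1 hQ] at this
    have heq : (S.filter p).toFinset = mset.toFinset := by
      apply Finset.eq_of_subset_of_card_le hfin
      rw [List.toFinset_card_of_nodup (hSnd.filter p), List.toFinset_card_of_nodup hmsnd, hP]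
    intro x
    constructor
    · rintro ⟨hx, hxv⟩
      have hxS : x ∈ S := (hmemS x).2 hx
      have hqx := hQ' x hxS
      by_contra hxm
      have : q x = true := (hqfact x).2 ⟨hxv, hxm⟩
      rw [hqx] at this
      exact Bool.false_ne_true this
    · intro hx
      have : x ∈ (S.filter p).toFinset := by
        rw [heq, List.mem_toFinset]; exact hx
      have := List.mem_filter.1 (List.mem_toFinset.1 this)
      exact ⟨(hmemS x).1 this.1, hmv x hx⟩
  · intro hh
    have heq : (S.filter p).toFinset = mset.toFinset := by
      apply Finset.Subset.antisymm hfin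
      intro c hc
      rw [List.mem_toFinset] at hc ⊢
      refine List.mem_filter.2 ⟨(hmemS c).2 ((hh c).2 hc).1, ?_⟩
      exact (hpfact c).2 ⟨hmv c hc, hc⟩
    have hP : (S.filter p).length = mset.length := by
      rw [← List.toFinset_card_of_nodup (hSnd.filter p), ← List.toFinset_card_of_nodup hmsnd, heq]
    have hQ : (S.filter q).length = 0 := by
      rw [List.length_eq_zero_iff, List.filter_eq_nil_iff]
      intro c hc
      by_contra hcq
      obtain ⟨hcv, hcm⟩ := (hqfact c).1 (by simpa using hcq)
      exact hcm ((hh c).1 ⟨(hmemS c).1 hc, hcv⟩)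
    omega

lemma svg_loop_eq (first : String) (rest acc : List String) :
    (rest.foldl (fun retlist itm =>
      if ((PySem.Set.ofList itm.toList).foldl (fun vc i =>
          if svgVowels.contains i then
            (if (PySem.Set.ofList (first.toList.filter (fun i => svgVowels.contains i))).contains i then vc + 1 else vc - 1)
          else vc) 0
        = PySem.Set.len (PySem.Set.ofList (first.toList.filter (fun i => svgVowels.contains i))))
      then retlist ++ [itm] else retlist) acc)
    = acc ++ rest.filter (fun w => PySem.Set.equal (svgVowelSet w) (svgVowelSet first)) := by
  induction rest generalizing acc with
  | nil => simp
  | cons x xs ih =>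
    simp only [List.foldl_cons, List.filter_cons]
    by_cases hb : PySem.Set.equal (svgVowelSet x) (svgVowelSet first) = true
    · rw [if_pos ((svg_cond_iff first x).2 hb), ih, hb]
      simp
    · rw [if_neg (fun hc => hb ((svg_cond_iff first x).1 hc)), ih]
      simp [hb]

-- ===== VERDICT (by name: the statement is the Claim_ definition above) =====
theorem same_vowel_group_spec : Claim_equal_same_vowel_group := by
  intro mlist _ hpre
  unfold Spec_same_vowel_group same_vowel_group same_vowel_group_alt
  match mlist with
  | [] => exact absurd rfl hpre
  | first :: rest =>
    simp only
    rw [svg_loop_eq first rest []]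
    simp
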